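-- pv_equiv track=rewrite | github.com/NKalavros/scMEDALTpy | ComputeDistance_optimized.py | distcalc_optimized
-- ===== SOURCE A (Python) =====
-- from collections import deque
--
-- def distcalc_optimized(node1, node2):
--     """Optimized MED distance calculation"""
--     if len(node1) != len(node2):
--         raise ValueError("Segments must have same length")
--
--     if len(node1) == 1:
--         return abs(node1[0] - node2[0])
--
--     # Use deque for efficient operations
--     diff_list = deque([node1[i] - node2[i] for i in range(len(node1))])
--
--     d = 0
--     while diff_list:
--         if diff_list[0] == 0:
--             diff_list.popleft()
--         elif diff_list[0] > 0:
--             # Find consecutive positive values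
--             k = 0
--             for i in range(len(diff_list)):
--                 if diff_list[i] > 0:
--                     k = i
--                 else:
--                     break
--
--             # Subtract 1 from all positive values
--             for i in range(k + 1):
--                 diff_list[i] -= 1
--             d += 1
--         elif diff_list[0] < 0:
--             # Find consecutive negative values
--             k = 0
--             for i in range(len(diff_list)):
--                 if diff_list[i] < 0:
--                     k = i
--                 else:
--                     break
--
--             # Add 1 to all negative values
--             for i in range(k + 1):
--                 diff_list[i] += 1
--             d += 1
--
--     return d
-- ===== SOURCE B (Python) =====
-- def distcalc_optimized(node1, node2):
--     """MED distance as half the total variation of the zero-padded difference array (one pass)."""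
--     if len(node1) != len(node2):
--         raise ValueError("Segments must have same length")
--     prev = 0
--     total = 0
--     for a, b in zip(node1, node2):
--         d = a - b
--         total += abs(d - prev)
--         prev = d
--     total += abs(prev)
--     return total // 2
-- ===== Notes on version B (the rewrite author's own statement) =====
-- stated objective: faster
-- what changed: A's while loop repeatedly decrements the maximal same-sign prefix run of the difference array (O(n*V) work); B computes the same MED distance in one pass as half the sum of absolute consecutive differences of the zero-padded difference array.
import Mathlib
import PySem

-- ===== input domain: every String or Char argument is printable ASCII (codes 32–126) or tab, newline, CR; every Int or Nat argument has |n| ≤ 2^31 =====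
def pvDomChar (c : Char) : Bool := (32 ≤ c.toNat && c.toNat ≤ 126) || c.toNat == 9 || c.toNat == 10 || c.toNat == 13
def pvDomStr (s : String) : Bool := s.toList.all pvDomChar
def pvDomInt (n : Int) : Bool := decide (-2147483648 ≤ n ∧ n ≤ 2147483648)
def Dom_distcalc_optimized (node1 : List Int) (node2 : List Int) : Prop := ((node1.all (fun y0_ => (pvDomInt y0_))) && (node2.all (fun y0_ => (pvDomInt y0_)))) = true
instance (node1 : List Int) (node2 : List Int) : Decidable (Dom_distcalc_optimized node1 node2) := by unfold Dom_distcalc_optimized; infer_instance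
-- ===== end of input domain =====

-- B replaces A's repeated prefix-run decrement loop by a single pass summing the absolute
-- consecutive differences of the zero-padded difference array, halved.

-- ===== PORT A =====

-- A's inner scan 'for i in range(len(diff_list)): if pred(diff_list[i]): k = i else: break'
def kloop (pred : Int → Bool) : List Int → Nat → Nat → Nat
  | [], _, k => k
  | x :: xs, i, k => if pred x then kloop pred xs (i + 1) i else k

-- termination measure for A's while loop: total absolute value + length
def ameasure (l : List Int) : Nat := (l.map Int.natAbs).sum + l.length

-- the two facts the port's decreasing_by cites (kloop scans a prefix; the in-place
-- update of a sign-homogeneous prefix strictly shrinks the measure)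
theorem kloop_spec (pred : Int → Bool) :
    ∀ (l : List Int) (i k : Nat),
      kloop pred l i k =
        if (l.takeWhile pred).length = 0 then k else i + (l.takeWhile pred).length - 1 := by
  intro l
  induction l with
  | nil => intro i k; simp [kloop]
  | cons x xs ih =>
      intro i k
      simp only [kloop, List.takeWhile_cons]
      by_cases hx : pred x
      · simp only [hx, if_true, List.length_cons, ih (i + 1) i]
        split <;> split <;> omega
      · simp [hx]

theorem kloop_run (pred : Int → Bool) (x : Int) (xs : List Int) (hx : pred x = true) :
    ((x :: xs).take (kloop pred (x :: xs) 0 0 + 1) = (x :: xs).takeWhile pred)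
    ∧ ((x :: xs).drop (kloop pred (x :: xs) 0 0 + 1) = (x :: xs).dropWhile pred)
    ∧ kloop pred (x :: xs) 0 0 < (x :: xs).length := by
  have htw : (x :: xs).takeWhile pred = x :: xs.takeWhile pred := by
    simp [hx]
  have hk : kloop pred (x :: xs) 0 0 + 1 = ((x :: xs).takeWhile pred).length := by
    rw [kloop_spec, htw]; simp
  have hpfx : (x :: xs).takeWhile pred = (x :: xs).take (((x :: xs).takeWhile pred).length) :=
    List.prefix_iff_eq_take.mp (List.takeWhile_prefix pred)
  refine ⟨by rw [hk]; exact hpfx.symm, ?_, ?_⟩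
  · rw [hk]
    set t := (x :: xs).takeWhile pred with ht
    set d := (x :: xs).dropWhile pred with hd
    rw [show x :: xs = t ++ d from (List.takeWhile_append_dropWhile).symm]
    exact List.drop_left
  · have hle : ((x :: xs).takeWhile pred).length ≤ (x :: xs).length :=
      (List.takeWhile_sublist pred).length_le
    omega

theorem ameasure_dec_step (f : Int → Int) :
    ∀ (l : List Int) (n : Nat), n < l.length →
      (∀ x ∈ l.take (n + 1), (f x).natAbs < x.natAbs) →
      ameasure ((l.take (n + 1)).map f ++ l.drop (n + 1)) < ameasure l := by
  intro l
  induction l with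
  | nil => intro n h; simp at h
  | cons x xs ih =>
      intro n h hf
      have hx : (f x).natAbs < x.natAbs := hf x (by simp)
      cases n with
      | zero =>
          simp only [List.take_succ_cons, List.take_zero, List.drop_succ_cons, List.drop_zero,
            List.map_cons, List.map_nil, List.nil_append, List.cons_append, ameasure,
            List.sum_cons, List.length_cons]
          omega
      | succ m =>
          have hm : m < xs.length := by simpa using h
          have ihm := ih m hm (fun y hy => hf y (by simp [List.take_succ_cons]; right; exact hy))
          simp only [ameasure, List.take_succ_cons, List.drop_succ_cons, List.map_cons,
            List.cons_append, List.sum_cons, List.length_cons] at ihm ⊢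
          omega

-- A's while loop over the deque of differences
def aloop (l : List Int) : Int :=
  match l with
  | [] => 0
  | x :: xs =>
      if x = 0 then aloop xs
      else if hpos : x > 0 then
        let k := kloop (fun y => y > 0) (x :: xs) 0 0
        1 + aloop (((x :: xs).take (k + 1)).map (fun v => v - 1) ++ (x :: xs).drop (k + 1))
      else
        let k := kloop (fun y => y < 0) (x :: xs) 0 0
        1 + aloop (((x :: xs).take (k + 1)).map (fun v => v + 1) ++ (x :: xs).drop (k + 1))
termination_by ameasure l
decreasing_by
  · simp [ameasure]; omega
  · obtain ⟨hTake, _, hLen⟩ := kloop_run (fun y => y > 0) x xs (by simpa using hpos)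
    apply ameasure_dec_step _ _ _ hLen
    intro v hv
    rw [hTake] at hv
    have hvp : (0 : Int) < v := by simpa using List.mem_takeWhile_imp hv
    omega
  · have hneg : x < 0 := by omega
    obtain ⟨hTake, _, hLen⟩ := kloop_run (fun y => y < 0) x xs (by simpa using hneg)
    apply ameasure_dec_step _ _ _ hLen
    intro v hv
    rw [hTake] at hv
    have hvp : v < (0 : Int) := by simpa using List.mem_takeWhile_imp hv
    omega

def distcalc_optimized (node1 : List Int) (node2 : List Int) : Int :=
  if node1.length ≠ node2.length then 0   -- Python raises ValueError here; excluded by Pre_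
  else if node1.length = 1 then |node1.headD 0 - node2.headD 0|
  else aloop (List.zipWith (fun a b => a - b) node1 node2)
       -- [node1[i] - node2[i] for i in range(len(node1))]: lengths are equal here

-- ===== PORT B =====

-- one pass: prev = previous difference, acc = running total of |d - prev|; final + |prev|
def bloop (prev acc : Int) : List Int → Int
  | [] => acc + |prev|
  | d :: ds => bloop d (acc + |d - prev|) ds

def distcalc_optimized_alt (node1 : List Int) (node2 : List Int) : Int :=
  if node1.length ≠ node2.length then 0   -- Python raises ValueError here; excluded by Pre_
  else PySem.Int.floordiv (bloop 0 0 (List.zipWith (fun a b => a - b) node1 node2)) 2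

-- ===== PRECONDITION & SPEC =====
-- Pre_ excludes exactly the inputs where A raises ValueError (unequal lengths)
def Pre_distcalc_optimized (node1 : List Int) (node2 : List Int) : Prop :=
  node1.length = node2.length
instance (node1 : List Int) (node2 : List Int) : Decidable (Pre_distcalc_optimized node1 node2) := by
  unfold Pre_distcalc_optimized; infer_instance

def pvWitness_distcalc_optimized : List Int × List Int := ([3, -1, 2], [1, 0, 2])

def Spec_distcalc_optimized (node1 : List Int) (node2 : List Int) (out : Int) : Prop := out = distcalc_optimized_alt node1 node2
instance (node1 : List Int) (node2 : List Int) (out : Int) : Decidable (Spec_distcalc_optimized node1 node2 out) := by unfold Spec_distcalc_optimized; infer_instance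

-- ===== CLAIM (what is proved, stated in full; the proofs are below) =====
def Claim_equal_distcalc_optimized : Prop := ∀ (node1 : List Int) (node2 : List Int), Dom_distcalc_optimized node1 node2 → Pre_distcalc_optimized node1 node2 → Spec_distcalc_optimized node1 node2 (distcalc_optimized node1 node2)

-- ===== LEMMAS AND PROOFS =====

-- sfun prev l = |l₀ - prev| + |l₁ - l₀| + … + |lastl| (B's total, written recursively)
def sfun : Int → List Int → Int
  | prev, [] => |prev|
  | prev, d :: ds => |d - prev| + sfun d ds

theorem bloop_eq_sfun : ∀ (l : List Int) (prev acc : Int), bloop prev acc l = acc + sfun prev l := by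
  intro l
  induction l with
  | nil => intro prev acc; simp [bloop, sfun]
  | cons d ds ih => intro prev acc; simp [bloop, sfun, ih]; ring

-- decrementing an all-positive run (next element, if any, nonpositive) lowers sfun by 1
theorem sfun_dec_pos :
    ∀ (P R : List Int) (prev : Int), (∀ p ∈ P, 0 < p) → 0 < prev →
      (R = [] ∨ ∃ r R', R = r :: R' ∧ r ≤ 0) →
      sfun prev (P ++ R) = 1 + sfun (prev - 1) (P.map (fun v => v - 1) ++ R) := by
  intro P
  induction P with
  | nil =>
      intro R prev _ hprev hR
      rcases hR with rfl | ⟨r, R', rfl, hr⟩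
      · simp [sfun, abs_of_pos hprev, abs_of_nonneg (by omega : (0:Int) ≤ prev - 1)]
      · simp only [List.nil_append, List.map_nil, sfun]
        rw [abs_of_nonpos (by omega : r - prev ≤ 0), abs_of_nonpos (by omega : r - (prev - 1) ≤ 0)]
        ring
  | cons p P' ih =>
      intro R prev hpos hprev hR
      have hp : 0 < p := hpos p (by simp)
      have := ih R p (fun q hq => hpos q (by simp [hq])) hp hR
      simp only [List.cons_append, List.map_cons, sfun]
      rw [show p - 1 - (prev - 1) = p - prev by ring]
      omega

-- incrementing an all-negative run (next element, if any, nonnegative) lowers sfun by 1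
theorem sfun_dec_neg :
    ∀ (P R : List Int) (prev : Int), (∀ p ∈ P, p < 0) → prev < 0 →
      (R = [] ∨ ∃ r R', R = r :: R' ∧ 0 ≤ r) →
      sfun prev (P ++ R) = 1 + sfun (prev + 1) (P.map (fun v => v + 1) ++ R) := by
  intro P
  induction P with
  | nil =>
      intro R prev _ hprev hR
      rcases hR with rfl | ⟨r, R', rfl, hr⟩
      · simp [sfun, abs_of_neg hprev, abs_of_nonpos (by omega : prev + 1 ≤ 0)]
      · simp only [List.nil_append, List.map_nil, sfun]
        rw [abs_of_nonneg (by omega : (0:Int) ≤ r - prev),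
            abs_of_nonneg (by omega : (0:Int) ≤ r - (prev + 1))]
        ring
  | cons p P' ih =>
      intro R prev hpos hprev hR
      have hp : p < 0 := hpos p (by simp)
      have := ih R p (fun q hq => hpos q (by simp [hq])) hp hR
      simp only [List.cons_append, List.map_cons, sfun]
      rw [show p + 1 - (prev + 1) = p - prev by ring]
      omega


theorem step_pos (x : Int) (xs : List Int) (hx : 0 < x) :
    sfun 0 (x :: xs) =
      2 + sfun 0 (((x :: xs).take (kloop (fun y => decide (y > 0)) (x :: xs) 0 0 + 1)).map (fun v => v - 1)
        ++ (x :: xs).drop (kloop (fun y => decide (y > 0)) (x :: xs) 0 0 + 1)) := by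
  obtain ⟨hT, hD, _⟩ := kloop_run (fun y => decide (y > 0)) x xs (by simpa using hx)
  rw [hT, hD]
  have htw : (x :: xs).takeWhile (fun y => decide (y > 0)) = x :: xs.takeWhile (fun y => decide (y > 0)) := by
    simp [hx]
  have hdw : (x :: xs).dropWhile (fun y => decide (y > 0)) = xs.dropWhile (fun y => decide (y > 0)) := by
    simp [hx]
  rw [htw, hdw]
  set P := xs.takeWhile (fun y => decide (y > 0)) with hP
  set R := xs.dropWhile (fun y => decide (y > 0)) with hR
  have hsplit : x :: xs = (x :: P) ++ R := by
    rw [List.cons_append]; congr 1; exact (List.takeWhile_append_dropWhile).symm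
  conv_lhs => rw [hsplit]
  simp only [List.map_cons, List.cons_append, sfun]
  have hPpos : ∀ p ∈ P, 0 < p := fun p hp => by simpa using List.mem_takeWhile_imp hp
  have hRcond : R = [] ∨ ∃ r R', R = r :: R' ∧ r ≤ 0 := by
    cases hr : R with
    | nil => exact Or.inl rfl
    | cons r R' =>
        refine Or.inr ⟨r, R', rfl, ?_⟩
        have h2 := List.head?_dropWhile_not (fun y => decide (y > 0)) xs
        rw [← hR, hr] at h2
        simp at h2
        omega
  have hdec := sfun_dec_pos P R x hPpos hx hRcond
  rw [abs_of_pos (by omega : (0:Int) < x - 0),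
      abs_of_nonneg (by omega : (0:Int) ≤ x - 1 - 0)]
  omega

theorem step_neg (x : Int) (xs : List Int) (hx : x < 0) :
    sfun 0 (x :: xs) =
      2 + sfun 0 (((x :: xs).take (kloop (fun y => decide (y < 0)) (x :: xs) 0 0 + 1)).map (fun v => v + 1)
        ++ (x :: xs).drop (kloop (fun y => decide (y < 0)) (x :: xs) 0 0 + 1)) := by
  obtain ⟨hT, hD, _⟩ := kloop_run (fun y => decide (y < 0)) x xs (by simpa using hx)
  rw [hT, hD]
  have htw : (x :: xs).takeWhile (fun y => decide (y < 0)) = x :: xs.takeWhile (fun y => decide (y < 0)) := by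
    simp [hx]
  have hdw : (x :: xs).dropWhile (fun y => decide (y < 0)) = xs.dropWhile (fun y => decide (y < 0)) := by
    simp [hx]
  rw [htw, hdw]
  set P := xs.takeWhile (fun y => decide (y < 0)) with hP
  set R := xs.dropWhile (fun y => decide (y < 0)) with hR
  have hsplit : x :: xs = (x :: P) ++ R := by
    rw [List.cons_append]; congr 1; exact (List.takeWhile_append_dropWhile).symm
  conv_lhs => rw [hsplit]
  simp only [List.map_cons, List.cons_append, sfun]
  have hPneg : ∀ p ∈ P, p < 0 := fun p hp => by simpa using List.mem_takeWhile_imp hp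
  have hRcond : R = [] ∨ ∃ r R', R = r :: R' ∧ 0 ≤ r := by
    cases hr : R with
    | nil => exact Or.inl rfl
    | cons r R' =>
        refine Or.inr ⟨r, R', rfl, ?_⟩
        have h2 := List.head?_dropWhile_not (fun y => decide (y < 0)) xs
        rw [← hR, hr] at h2
        simp at h2
        omega
  have hdec := sfun_dec_neg P R x hPneg hx hRcond
  rw [abs_of_neg (by omega : x - 0 < 0),
      abs_of_nonpos (by omega : x + 1 - 0 ≤ 0)]
  omega

theorem aloop_eq_sfun : ∀ (l : List Int), 2 * aloop l = sfun 0 l := by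
  intro l
  fun_induction aloop l with
  | case1 => simp [sfun]
  | case2 xs ih => simp [sfun, ih]
  | case3 x xs h1 h2 k ih =>
      rw [step_pos x xs (by omega)]
      have hk : k = kloop (fun y => decide (y > 0)) (x :: xs) 0 0 := rfl
      simp only [hk] at ih ⊢
      omega
  | case4 x xs h1 h2 k ih =>
      rw [step_neg x xs (by omega)]
      have hk : k = kloop (fun y => decide (y < 0)) (x :: xs) 0 0 := rfl
      simp only [hk] at ih ⊢
      omega

theorem aloop_eq_half : ∀ (l : List Int), aloop l = PySem.Int.floordiv (sfun 0 l) 2 := by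
  intro l
  rw [← aloop_eq_sfun l]
  simp [PySem.Int.floordiv]

-- ===== VERDICT (by name: the statement is the Claim_ definition above) =====
theorem distcalc_optimized_spec : Claim_equal_distcalc_optimized := by
  intro node1 node2 _ hpre
  unfold Pre_distcalc_optimized at hpre
  unfold Spec_distcalc_optimized distcalc_optimized distcalc_optimized_alt
  rw [if_neg (not_not_intro hpre), if_neg (not_not_intro hpre), bloop_eq_sfun]
  by_cases h1 : node1.length = 1
  · rw [if_pos h1]
    obtain ⟨a, rfl⟩ := List.length_eq_one_iff.mp h1
    obtain ⟨b, rfl⟩ := List.length_eq_one_iff.mp (show node2.length = 1 by omega)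
    simp only [List.zipWith, List.headD, sfun, zero_add, sub_zero]
    rw [show |a - b| + |a - b| = 2 * |a - b| by ring]
    simp [PySem.Int.floordiv]
  · rw [if_neg h1, aloop_eq_half]; ring_nf
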